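-- pv_equiv track=rewrite | github.com/Mainorrr/IA-SEARCHING | Ordenar-Colores/ListaAbiertaCerrada.py | estado_a_matriz
-- ===== SOURCE A (Python) =====
-- def estado_a_matriz(estado):
--     """Convierte el estado (columnas) a una matriz de 6x6 para impresión."""
--     filas = []
--     for nivel in reversed(range(6)):  # de la fila superior (5) a la inferior (0)
--         fila = []
--         for col in estado:
--             if len(col) > nivel:
--                 fila.append(col[nivel])
--             else:
--                 fila.append('_')
--         filas.append(fila)
--     return filas
-- ===== SOURCE B (Python) =====
-- def estado_a_matriz(estado):
--     """Convierte el estado (columnas) a una matriz de 6x6 para impresión."""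
--     filas = [[] for _ in range(6)]
--     for col in estado:
--         it = iter(col)
--         celdas = [next(it, '_') for _ in range(6)]  # niveles 0..5, rellenado por agotamiento
--         celdas.reverse()                            # nivel superior primero
--         for fila, celda in zip(filas, celdas):
--             fila.append(celda)
--     return filas
-- ===== Notes on version B (the rewrite author's own statement) =====
-- stated objective: alternative
-- what changed: B traverses estado exactly once, maintaining six row accumulators and appending each column's reversed level-cells to them, with padding done by iterator exhaustion (next(it,'_')) instead of A's per-cell length test inside six separate passes over estado.
import Mathlib
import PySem

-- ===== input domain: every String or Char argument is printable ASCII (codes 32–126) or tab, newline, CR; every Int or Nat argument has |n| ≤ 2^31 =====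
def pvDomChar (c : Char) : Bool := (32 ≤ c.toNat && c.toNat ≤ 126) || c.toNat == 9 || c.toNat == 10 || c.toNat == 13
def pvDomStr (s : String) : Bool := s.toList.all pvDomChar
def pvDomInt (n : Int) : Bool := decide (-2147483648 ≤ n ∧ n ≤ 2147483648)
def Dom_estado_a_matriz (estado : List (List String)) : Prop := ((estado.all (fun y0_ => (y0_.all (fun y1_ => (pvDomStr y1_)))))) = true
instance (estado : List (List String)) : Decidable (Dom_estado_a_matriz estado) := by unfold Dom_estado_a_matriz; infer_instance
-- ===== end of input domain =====

-- B makes ONE pass over the columns, appending each column's cells to six row accumulators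
-- (padding by iterator exhaustion), instead of A's six level-passes over estado; objective: alternative.

-- ===== PORT A =====
-- for nivel in reversed(range(6)): for col in estado: append col[nivel] if len(col) > nivel else '_'
def estado_a_matriz (estado : List (List String)) : List (List String) :=
  ((List.range 6).reverse).foldl (fun filas (nivel : Nat) =>
    filas ++ [estado.foldl (fun fila col =>
      fila ++ [if col.length > nivel then (PySem.List.pyGet? col (nivel : Int)).getD "_" else "_"]) []]) []

-- ===== PORT B =====
-- celdas = [next(it, '_') for _ in range(6)]  — take n cells from the iterator, pad with '_' on exhaustion
def takePad (n : Nat) (xs : List String) : List String :=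
  match n, xs with
  | 0, _ => []
  | n+1, [] => "_" :: takePad n []
  | n+1, x :: xs => x :: takePad n xs

-- filas = [[] for _ in range(6)]; for col: celdas = takePad; celdas.reverse(); zip-append into filas
def estado_a_matriz_alt (estado : List (List String)) : List (List String) :=
  estado.foldl (fun filas col =>
    let celdas := (takePad 6 col).reverse
    List.zipWith (fun fila celda => fila ++ [celda]) filas celdas)
    (List.replicate 6 [])

-- ===== PRECONDITION & SPEC =====
def Spec_estado_a_matriz (estado : List (List String)) (out : List (List String)) : Prop := out = estado_a_matriz_alt estado
instance (estado : List (List String)) (out : List (List String)) : Decidable (Spec_estado_a_matriz estado out) := by unfold Spec_estado_a_matriz; infer_instance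

-- ===== CLAIM (what is proved, stated in full; the proofs are below) =====
def Claim_equal_estado_a_matriz : Prop := ∀ (estado : List (List String)), Dom_estado_a_matriz estado → Spec_estado_a_matriz estado (estado_a_matriz estado)

-- ===== LEMMAS AND PROOFS =====

theorem takePad_eq (n : Nat) (xs : List String) :
    takePad n xs = (List.range n).map (fun i => xs.getD i "_") := by
  induction n generalizing xs with
  | zero => simp [takePad]
  | succ n ih =>
    cases xs with
    | nil => simp [takePad, ih, List.range_succ_eq_map, List.map_map, Function.comp_def]
    | cons x xs => simp [takePad, ih, List.range_succ_eq_map, List.map_map, Function.comp_def]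

-- A's cell expression is exactly getD
theorem cellA_eq (col : List String) (nivel : Nat) :
    (if col.length > nivel then (PySem.List.pyGet? col (nivel : Int)).getD "_" else "_")
      = col.getD nivel "_" := by
  rw [PySem.List.pyGet?_natCast]
  by_cases h : col.length > nivel
  · simp [h, List.getD]
  · simp [h, List.getD]

-- B's loop invariant over explicit six accumulators
theorem altLoop (l : List (List String)) (f0 f1 f2 f3 f4 f5 : List String) :
    l.foldl (fun filas col =>
      let celdas := (takePad 6 col).reverse
      List.zipWith (fun fila celda => fila ++ [celda]) filas celdas)
      [f0, f1, f2, f3, f4, f5]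
    = [f0 ++ l.map (fun c => c.getD 5 "_"), f1 ++ l.map (fun c => c.getD 4 "_"),
       f2 ++ l.map (fun c => c.getD 3 "_"), f3 ++ l.map (fun c => c.getD 2 "_"),
       f4 ++ l.map (fun c => c.getD 1 "_"), f5 ++ l.map (fun c => c.getD 0 "_")] := by
  induction l generalizing f0 f1 f2 f3 f4 f5 with
  | nil => simp
  | cons col l ih =>
    have h : takePad 6 col = [col.getD 0 "_", col.getD 1 "_", col.getD 2 "_",
        col.getD 3 "_", col.getD 4 "_", col.getD 5 "_"] := by
      rw [takePad_eq]; rfl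
    simp only [List.foldl_cons, h, List.reverse_cons, List.reverse_nil, List.nil_append,
      List.cons_append, List.zipWith, ih, List.map_cons, List.append_assoc]

theorem estado_a_matriz_spec : Claim_equal_estado_a_matriz := by
  intro estado _
  show estado_a_matriz estado = estado_a_matriz_alt estado
  unfold estado_a_matriz estado_a_matriz_alt
  have hr : (List.range 6).reverse = [5, 4, 3, 2, 1, 0] := by decide
  have hrep : (List.replicate 6 ([] : List String)) = [[], [], [], [], [], []] := by decide
  rw [hr, hrep, altLoop]
  simp only [List.foldl_cons, List.foldl_nil, List.nil_append]
  rw [PySem.List.foldl_append_singleton_eq_map, PySem.List.foldl_append_singleton_eq_map,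
      PySem.List.foldl_append_singleton_eq_map, PySem.List.foldl_append_singleton_eq_map,
      PySem.List.foldl_append_singleton_eq_map, PySem.List.foldl_append_singleton_eq_map]
  simp only [List.nil_append, cellA_eq]
  rfl

-- ===== VERDICT (by name: the statement is the Claim_ definition above) =====
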